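-- pv_equiv track=rewrite | github.com/ChuyueSun/VeriStruct | src/modules/nonlinear_detection.py | _is_in_specification_context
-- ===== SOURCE A (Python) =====
-- from typing import List, Set, Tuple
--
-- def _is_in_specification_context(lines: List[str], line_idx: int) -> bool:
--     """
--     Check if a line is within a specification context (assert, requires, ensures).
--
--     Args:
--         lines: All lines of code
--         line_idx: Index of the line to check
--
--     Returns:
--         True if line is in specification context
--     """
--     if line_idx < 0 or line_idx >= len(lines):
--         return False
--
--     current_line = lines[line_idx].strip()
--
--     # Direct check for assert
--     if current_line.startswith('assert'):
--         return True
--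
--     # Check for requires/ensures context by looking backwards
--     for i in range(line_idx, -1, -1):
--         line = lines[i].strip()
--         if line.startswith('fn ') or line.startswith('pub fn '):
--             # Found function definition, check if we're in requires/ensures
--             for j in range(i, min(line_idx + 1, len(lines))):
--                 check_line = lines[j].strip()
--                 if any(keyword in check_line for keyword in ['requires', 'ensures']):
--                     return True
--             break
--
--     return False
-- ===== SOURCE B (Python) =====
-- def _is_in_specification_context(lines, line_idx):
--     if line_idx < 0 or line_idx >= len(lines):
--         return False
--     if lines[line_idx].strip().startswith('assert'):
--         return True
--     found = False
--     for i in range(line_idx, -1, -1):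
--         line = lines[i].strip()
--         if 'requires' in line or 'ensures' in line:
--             found = True
--         if line.startswith('fn ') or line.startswith('pub fn '):
--             return found
--     return False
-- ===== Notes on version B (the rewrite author's own statement) =====
-- stated objective: simpler
-- what changed: Replaces the find-the-fn-line-then-rescan-forward two-loop structure with a single backward pass that accumulates a 'keyword seen' flag and returns it when the fn line is reached.
import Mathlib
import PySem

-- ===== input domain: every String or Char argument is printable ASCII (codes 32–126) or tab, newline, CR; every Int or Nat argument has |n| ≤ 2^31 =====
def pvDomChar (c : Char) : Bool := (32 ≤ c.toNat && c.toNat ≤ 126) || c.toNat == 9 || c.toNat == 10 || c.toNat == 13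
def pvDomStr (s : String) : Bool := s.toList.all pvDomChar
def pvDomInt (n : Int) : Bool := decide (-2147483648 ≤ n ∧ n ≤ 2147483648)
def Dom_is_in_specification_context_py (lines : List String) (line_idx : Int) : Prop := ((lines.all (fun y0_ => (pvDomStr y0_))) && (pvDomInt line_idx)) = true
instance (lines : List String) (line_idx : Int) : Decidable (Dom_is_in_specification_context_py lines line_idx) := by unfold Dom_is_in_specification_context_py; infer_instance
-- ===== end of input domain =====

-- B replaces A's find-fn-then-rescan-forward two-loop structure with a single backward
-- pass carrying a 'keyword seen' flag (objective: simpler); same return value everywhere.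
-- ===== PORT A =====
-- literal transliteration of A: outer backward scan; on the first fn line, an inner
-- forward scan over range(i, min(line_idx+1, len(lines))) looking for the keywords
def aScan (lines : List String) (line_idx : Int) : List Int → Bool
  | [] => false
  | i :: rest =>
    let line := PySem.Str.strip (PySem.List.pyGetD lines i "")
    if PySem.Str.startswith line "fn " || PySem.Str.startswith line "pub fn " then
      (PySem.List.pyRange i (min (line_idx + 1) (PySem.List.len lines)) 1).any
        (fun j =>
          let check_line := PySem.Str.strip (PySem.List.pyGetD lines j "")
          ["requires", "ensures"].any (fun keyword => PySem.Str.isIn keyword check_line))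
    else aScan lines line_idx rest

def is_in_specification_context_py (lines : List String) (line_idx : Int) : Bool :=
  if line_idx < 0 || PySem.List.len lines ≤ line_idx then false
  else
    let current_line := PySem.Str.strip (PySem.List.pyGetD lines line_idx "")
    if PySem.Str.startswith current_line "assert" then true
    else aScan lines line_idx (PySem.List.pyRange line_idx (-1) (-1))

-- ===== PORT B =====
-- B: ONE backward pass accumulating a 'keyword seen' flag, returned at the fn line
def bScan (lines : List String) (found : Bool) : List Int → Bool
  | [] => false
  | i :: rest =>
    let line := PySem.Str.strip (PySem.List.pyGetD lines i "")
    let found' := found || (PySem.Str.isIn "requires" line || PySem.Str.isIn "ensures" line)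
    if PySem.Str.startswith line "fn " || PySem.Str.startswith line "pub fn " then found'
    else bScan lines found' rest

def is_in_specification_context_py_alt (lines : List String) (line_idx : Int) : Bool :=
  if line_idx < 0 || PySem.List.len lines ≤ line_idx then false
  else if PySem.Str.startswith (PySem.Str.strip (PySem.List.pyGetD lines line_idx "")) "assert" then true
  else bScan lines false (PySem.List.pyRange line_idx (-1) (-1))

-- ===== PRECONDITION & SPEC =====
def Spec_is_in_specification_context_py (lines : List String) (line_idx : Int) (out : Bool) : Prop := out = is_in_specification_context_py_alt lines line_idx
instance (lines : List String) (line_idx : Int) (out : Bool) : Decidable (Spec_is_in_specification_context_py lines line_idx out) := by unfold Spec_is_in_specification_context_py; infer_instance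

-- ===== CLAIM (what is proved, stated in full; the proofs are below) =====
def Claim_equal_is_in_specification_context_py : Prop := ∀ (lines : List String) (line_idx : Int), Dom_is_in_specification_context_py lines line_idx → Spec_is_in_specification_context_py lines line_idx (is_in_specification_context_py lines line_idx)

-- ===== LEMMAS AND PROOFS =====
-- the keyword test both ports apply to the stripped line at index j
def kwAt (lines : List String) (j : Int) : Bool :=
  PySem.Str.isIn "requires" (PySem.Str.strip (PySem.List.pyGetD lines j "")) ||
  PySem.Str.isIn "ensures" (PySem.Str.strip (PySem.List.pyGetD lines j ""))

lemma or_rot (a b c : Bool) : (c || (a || b)) = (a || b || c) := by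
  cases a <;> cases b <;> cases c <;> rfl

-- loop invariant: B's accumulated flag equals "some keyword strictly above the
-- current position (up to L)", which makes the two scans agree on the rest
lemma scan_eq (lines : List String) (L : Int) (hL : L + 1 ≤ PySem.List.len lines) :
    ∀ (t : Nat), (t : Int) ≤ L → ∀ (found : Bool),
      found = (PySem.List.pyRange ((t : Int) + 1) (L + 1) 1).any (fun j => kwAt lines j) →
      bScan lines found (PySem.List.pyRange (t : Int) (-1) (-1)) =
      aScan lines L (PySem.List.pyRange (t : Int) (-1) (-1)) := by
  have hmin : min (L + 1) (PySem.List.len lines) = L + 1 := by omega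
  intro t
  induction t with
  | zero =>
    intro _ found hf
    rw [Nat.cast_zero, PySem.List.pyRange_neg_one_cons (by norm_num),
        show ((0:Int) - 1) = -1 by norm_num, PySem.List.pyRange_neg_one_eq_nil (by norm_num)]
    simp only [bScan, aScan, List.any_cons, List.any_nil, Bool.or_false]
    by_cases hfn : (PySem.Str.startswith (PySem.Str.strip (PySem.List.pyGetD lines 0 "")) "fn " ||
        PySem.Str.startswith (PySem.Str.strip (PySem.List.pyGetD lines 0 "")) "pub fn ") = true
    · rw [if_pos hfn, if_pos hfn, hmin, PySem.List.pyRange_one_cons (by omega)]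
      simp only [List.any_cons]
      rw [hf, show ((0:Int) + 1) = 1 by norm_num]
      simp only [kwAt]
      exact or_rot _ _ _
    · rw [if_neg hfn, if_neg hfn]
  | succ n ih =>
    intro ht found hf
    have hc : ((n.succ : Nat) : Int) = (n : Int) + 1 := by push_cast; ring
    rw [hc] at ht hf ⊢
    rw [PySem.List.pyRange_neg_one_cons (by omega), show ((n:Int) + 1 - 1) = (n:Int) by ring]
    simp only [bScan, aScan, List.any_cons, List.any_nil, Bool.or_false]
    by_cases hfn : (PySem.Str.startswith (PySem.Str.strip (PySem.List.pyGetD lines ((n:Int) + 1) "")) "fn " ||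
        PySem.Str.startswith (PySem.Str.strip (PySem.List.pyGetD lines ((n:Int) + 1) "")) "pub fn ") = true
    · rw [if_pos hfn, if_pos hfn, hmin, PySem.List.pyRange_one_cons (by omega)]
      simp only [List.any_cons]
      rw [hf]
      simp only [kwAt]
      exact or_rot _ _ _
    · rw [if_neg hfn, if_neg hfn]
      apply ih (by omega)
      rw [hf, PySem.List.pyRange_one_cons (show (n:Int) + 1 < L + 1 by omega)]
      simp only [List.any_cons, kwAt]
      exact or_rot _ _ _

-- ===== VERDICT (by name: the statement is the Claim_ definition above) =====
theorem is_in_specification_context_py_spec : Claim_equal_is_in_specification_context_py := by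
  intro lines line_idx _
  unfold Spec_is_in_specification_context_py
  unfold is_in_specification_context_py is_in_specification_context_py_alt
  by_cases hb : ((decide (line_idx < 0) || decide (PySem.List.len lines ≤ line_idx)) = true)
  · rw [if_pos hb, if_pos hb]
  · rw [if_neg hb, if_neg hb]
    by_cases ha : (PySem.Str.startswith (PySem.Str.strip (PySem.List.pyGetD lines line_idx "")) "assert") = true
    · rw [if_pos ha, if_pos ha]
    · rw [if_neg ha, if_neg ha]
      have hb' : 0 ≤ line_idx ∧ line_idx + 1 ≤ PySem.List.len lines := by
        simp only [Bool.or_eq_true, decide_eq_true_eq, not_or] at hb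
        omega
      have h := scan_eq lines line_idx hb'.2 line_idx.toNat
        (by rw [Int.toNat_of_nonneg hb'.1]) false
        (by rw [Int.toNat_of_nonneg hb'.1, PySem.List.pyRange_one_eq_nil (by omega)]; rfl)
      rw [Int.toNat_of_nonneg hb'.1] at h
      exact h.symm
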